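-- pv_equiv track=rewrite | github.com/jramaswami/Binary_Search_Python | equalize_even_and_odd_index_sums.py | solve
-- ===== SOURCE A (Python) =====
-- def solve(nums):
--     odd_suffix = [0 for _ in nums]
--     even_suffix = [0 for _ in nums]
--     odd_suffix.append(0)
--     even_suffix.append(0)
--
--     odd_sum = 0
--     even_sum = 0
--     for negi, n in enumerate(reversed(nums), start=-(len(nums) - 1)):
--         if abs(negi) % 2:
--             odd_sum += n
--         else:
--             even_sum += n
--         odd_suffix[-negi] = odd_sum
--         even_suffix[-negi] = even_sum
--
--     soln = 0
--     odd_sum = 0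
--     even_sum = 0
--     for i, n in enumerate(nums):
--         if odd_sum + even_suffix[i+1] == even_sum + odd_suffix[i+1]:
--             soln += 1
--         if i % 2:
--             odd_sum += n
--         else:
--             even_sum += n
--     return soln
-- ===== SOURCE B (Python) =====
-- def solve(nums):
--     # Alternating-sum reformulation: removing index i balances the even/odd index sums
--     # iff 2*P(i) + (-1)^i * nums[i] == T, where P(i) is the alternating prefix sum
--     # before i and T the alternating sum of the whole list. One signed scalar per pass,
--     # no parity-split sums, no suffix arrays, no backward pass.
--     total = 0
--     sign = 1
--     for x in nums:
--         total += sign * x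
--         sign = -sign
--     count = 0
--     prefix = 0
--     sign = 1
--     for x in nums:
--         if 2 * prefix + sign * x == total:
--             count += 1
--         prefix += sign * x
--         sign = -sign
--     return count
-- ===== Notes on version B (the rewrite author's own statement) =====
-- stated objective: simpler
-- what changed: B reformulates the balance test algebraically: removal of index i equalizes the sums iff 2*P(i) + (-1)^i*nums[i] equals the total alternating sum T, so it keeps one signed scalar (alternating prefix) per pass instead of A's parity-split even/odd sums, two suffix arrays and a backward pass.
import Mathlib
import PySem

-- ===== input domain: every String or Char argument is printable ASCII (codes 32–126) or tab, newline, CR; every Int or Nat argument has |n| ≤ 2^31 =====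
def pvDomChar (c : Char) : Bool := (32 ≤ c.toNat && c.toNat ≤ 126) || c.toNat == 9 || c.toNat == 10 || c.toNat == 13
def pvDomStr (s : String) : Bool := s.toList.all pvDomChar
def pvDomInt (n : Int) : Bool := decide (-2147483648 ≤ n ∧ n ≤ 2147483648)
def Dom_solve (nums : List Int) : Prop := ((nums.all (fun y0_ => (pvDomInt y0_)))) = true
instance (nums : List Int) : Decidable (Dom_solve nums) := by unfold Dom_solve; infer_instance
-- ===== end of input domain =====

-- B reformulates the test algebraically via one alternating (signed) sum: removing index i
-- balances the sums iff 2*P(i) + (-1)^i*nums[i] = T; no parity-split sums, suffix arrays or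
-- backward pass (simpler; same O(n) time).

-- ===== PORT A =====
-- backward loop body: 'if abs(negi) % 2: odd_sum += n else: even_sum += n;
--   odd_suffix[-negi] = odd_sum; even_suffix[-negi] = even_sum'
-- state: (odd_suffix, even_suffix, odd_sum, even_sum)
def solveStepBack (st : List Int × List Int × Int × Int) (p : Int × Int) : List Int × List Int × Int × Int :=
  let oddSum := if PySem.Int.mod |p.1| 2 ≠ 0 then st.2.2.1 + p.2 else st.2.2.1
  let evenSum := if PySem.Int.mod |p.1| 2 ≠ 0 then st.2.2.2 else st.2.2.2 + p.2
  (PySem.List.pySetD st.1 (-p.1) oddSum, PySem.List.pySetD st.2.1 (-p.1) evenSum, oddSum, evenSum)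

-- forward loop body; state: (soln, odd_sum, even_sum)
def solveStepFwd (oddSuffix evenSuffix : List Int) (st : Int × Int × Int) (p : Int × Int) : Int × Int × Int :=
  let soln := if st.2.1 + PySem.List.pyGetD evenSuffix (p.1 + 1) 0 = st.2.2 + PySem.List.pyGetD oddSuffix (p.1 + 1) 0 then st.1 + 1 else st.1
  if PySem.Int.mod p.1 2 ≠ 0 then (soln, st.2.1 + p.2, st.2.2) else (soln, st.2.1, st.2.2 + p.2)

def solve (nums : List Int) : Int :=
  let oddSuffix := List.replicate nums.length (0:Int) ++ [0]
  let evenSuffix := List.replicate nums.length (0:Int) ++ [0]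
  let back := (PySem.List.enumerate nums.reverse (-((nums.length:Int) - 1))).foldl solveStepBack (oddSuffix, evenSuffix, 0, 0)
  ((PySem.List.enumerate nums 0).foldl (solveStepFwd back.1 back.2.1) (0, 0, 0)).1

-- ===== PORT B =====
-- 'total += sign * x; sign = -sign'; state: (total, sign)
def altStepT (st : Int × Int) (x : Int) : Int × Int := (st.1 + st.2 * x, -st.2)

-- 'if 2*prefix + sign*x == total: count += 1; prefix += sign*x; sign = -sign'
-- state: (count, prefix, sign)
def altStep (total : Int) (st : Int × Int × Int) (x : Int) : Int × Int × Int :=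
  let count := if 2 * st.2.1 + st.2.2 * x = total then st.1 + 1 else st.1
  (count, st.2.1 + st.2.2 * x, -st.2.2)

def solve_alt (nums : List Int) : Int :=
  let total := (nums.foldl altStepT (0, 1)).1
  (nums.foldl (altStep total) (0, 0, 1)).1

-- ===== PRECONDITION & SPEC =====
def Spec_solve (nums : List Int) (out : Int) : Prop := out = solve_alt nums
instance (nums : List Int) (out : Int) : Decidable (Spec_solve nums out) := by unfold Spec_solve; infer_instance

-- ===== CLAIM (what is proved, stated in full; the proofs are below) =====
def Claim_equal_solve : Prop := ∀ (nums : List Int), Dom_solve nums → Spec_solve nums (solve nums)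

-- ===== LEMMAS AND PROOFS =====

-- sum of the elements of l sitting at even positions (b = true: position 0 counts) resp. odd positions (b = false)
def ssum : Bool → List Int → Int
  | _, [] => 0
  | b, x :: l => (if b then x else 0) + ssum (!b) l

-- alternating sum of l with leading sign s
def asum : Int → List Int → Int
  | _, [] => 0
  | s, x :: l => s * x + asum (-s) l

theorem ssum_append (l1 l2 : List Int) (b : Bool) :
    ssum b (l1 ++ l2) = ssum b l1 + ssum (if l1.length % 2 = 0 then b else !b) l2 := by
  induction l1 generalizing b with
  | nil => simp [ssum]
  | cons x l ih =>
    simp only [List.cons_append, ssum, ih (!b), List.length_cons]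
    rcases Nat.mod_two_eq_zero_or_one l.length with h | h <;>
      simp [h, Nat.add_mod, Int.add_assoc]

theorem asum_pm (l : List Int) :
    asum 1 l = ssum true l - ssum false l ∧ asum (-1) l = ssum false l - ssum true l := by
  induction l with
  | nil => simp [asum, ssum]
  | cons x l ih =>
    constructor <;> simp [asum, ssum, ih.1, ih.2] <;> ring

theorem foldT (l : List Int) : ∀ (t s : Int), (l.foldl altStepT (t, s)).1 = t + asum s l := by
  induction l with
  | nil => simp [asum]
  | cons x l ih =>
    intro t s
    simp only [List.foldl_cons, altStepT, ih, asum]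
    ring

theorem drop_set_eq_cons {α : Type} (l : List α) (n : Nat) (v : α) (h : n < l.length) :
    (l.set n v).drop n = v :: l.drop (n + 1) := by
  induction l generalizing n with
  | nil => simp at h
  | cons x l ih =>
    cases n with
    | zero => simp
    | succ m => simpa using ih m (by simpa using h)

theorem flag_par1 (j n : Nat) (h : j ≤ n) :
    (if (n - j) % 2 = 0 then decide (j % 2 = 1) else !decide (j % 2 = 1)) = decide (n % 2 = 1) := by
  rcases Nat.mod_two_eq_zero_or_one j with hj | hj <;>
    rcases Nat.mod_two_eq_zero_or_one n with hn | hn <;>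
      first
        | (have hd : (n - j) % 2 = 0 := by omega
           simp [hd, hj, hn])
        | (have hd : (n - j) % 2 = 1 := by omega
           simp [hd, hj, hn])

theorem flag_par0 (j n : Nat) (h : j ≤ n) :
    (if (n - j) % 2 = 0 then decide (j % 2 = 0) else !decide (j % 2 = 0)) = decide (n % 2 = 0) := by
  rcases Nat.mod_two_eq_zero_or_one j with hj | hj <;>
    rcases Nat.mod_two_eq_zero_or_one n with hn | hn <;>
      first
        | (have hd : (n - j) % 2 = 0 := by omega
           simp [hd, hj, hn])
        | (have hd : (n - j) % 2 = 1 := by omega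
           simp [hd, hj, hn])

-- A's backward pass fills position j of each suffix array with the parity-split sum of r.reverse from j on
theorem back_spec (r Ao Ae : List Int) (os es : Int)
    (hAo : r.length ≤ Ao.length) (hAe : r.length ≤ Ae.length) :
    (PySem.List.enumerate r (-((r.length:Int) - 1))).foldl solveStepBack (Ao, Ae, os, es) =
      ((List.range r.length).map (fun j => os + ssum (decide (j % 2 = 1)) (r.reverse.drop j)) ++ Ao.drop r.length,
       (List.range r.length).map (fun j => es + ssum (decide (j % 2 = 0)) (r.reverse.drop j)) ++ Ae.drop r.length,
       os + ssum false r.reverse, es + ssum true r.reverse) := by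
  induction r generalizing Ao Ae os es with
  | nil => simp [PySem.List.enumerate_nil, ssum]
  | cons x r ih =>
    obtain ⟨n, hnn⟩ : ∃ n, r.length = n := ⟨r.length, rfl⟩
    rw [hnn] at ih
    have hn : (x :: r).length = n + 1 := by simp [hnn]
    have hs : -(((x :: r).length : Int) - 1) = -(n : Int) := by rw [hn]; push_cast; ring
    rw [hs, PySem.List.enumerate_cons, List.foldl_cons]
    have habs : |(-((n:Nat):Int))| = ((n:Nat):Int) := by simp
    have hm : PySem.Int.mod ((n:Nat):Int) 2 = (((n % 2 : Nat)):Int) := by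
      exact_mod_cast PySem.Int.mod_natCast n 2
    have hstep : solveStepBack (Ao, Ae, os, es) (-(n:Int), x) =
        (Ao.set n (os + if n % 2 = 1 then x else 0),
         Ae.set n (es + if n % 2 = 0 then x else 0),
         os + (if n % 2 = 1 then x else 0), es + (if n % 2 = 0 then x else 0)) := by
      simp only [solveStepBack, habs, neg_neg, hm, PySem.List.pySetD_natCast]
      rcases Nat.mod_two_eq_zero_or_one n with h | h <;> simp [h]
    rw [hstep]
    have hs2 : (-(n:Int)) + 1 = -(((n:Nat):Int) - 1) := by ring
    rw [hs2]
    rw [ih _ _ _ _ (by rw [List.length_set]; rw [hn] at hAo; omega) (by rw [List.length_set]; rw [hn] at hAe; omega)]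
    have hrev : (x :: r).reverse = r.reverse ++ [x] := by simp
    have hrevlen : r.reverse.length = n := by simp [hnn]
    have hdropn : ((x :: r).reverse).drop n = [x] := by
      rw [hrev, ← hrevlen, List.drop_left]
    have hlast1 : os + ssum (decide (n % 2 = 1)) (((x :: r).reverse).drop n)
        = os + (if n % 2 = 1 then x else 0) := by
      rw [hdropn]; rcases Nat.mod_two_eq_zero_or_one n with h | h <;> simp [h, ssum]
    have hlast0 : es + ssum (decide (n % 2 = 0)) (((x :: r).reverse).drop n)
        = es + (if n % 2 = 0 then x else 0) := by
      rw [hdropn]; rcases Nat.mod_two_eq_zero_or_one n with h | h <;> simp [h, ssum]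
    have haO : (List.range n).map (fun j => (os + if n % 2 = 1 then x else 0) + ssum (decide (j % 2 = 1)) (r.reverse.drop j))
        = (List.range n).map (fun j => os + ssum (decide (j % 2 = 1)) (((x :: r).reverse).drop j)) := by
      refine List.map_congr_left ?_
      intro j hj
      rw [List.mem_range] at hj
      rw [hrev, List.drop_append_of_le_length (by omega), ssum_append, List.length_drop, hrevlen,
          flag_par1 j n (by omega)]
      rcases Nat.mod_two_eq_zero_or_one n with h | h <;> simp [h, ssum] <;> ring
    have haE : (List.range n).map (fun j => (es + if n % 2 = 0 then x else 0) + ssum (decide (j % 2 = 0)) (r.reverse.drop j))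
        = (List.range n).map (fun j => es + ssum (decide (j % 2 = 0)) (((x :: r).reverse).drop j)) := by
      refine List.map_congr_left ?_
      intro j hj
      rw [List.mem_range] at hj
      rw [hrev, List.drop_append_of_le_length (by omega), ssum_append, List.length_drop, hrevlen,
          flag_par0 j n (by omega)]
      rcases Nat.mod_two_eq_zero_or_one n with h | h <;> simp [h, ssum] <;> ring
    have hsum1 : (os + (if n % 2 = 1 then x else 0)) + ssum false r.reverse
        = os + ssum false ((x :: r).reverse) := by
      rw [hrev, ssum_append, hrevlen]
      rcases Nat.mod_two_eq_zero_or_one n with h | h <;> simp [h, ssum] <;> ring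
    have hsum0 : (es + (if n % 2 = 0 then x else 0)) + ssum true r.reverse
        = es + ssum true ((x :: r).reverse) := by
      rw [hrev, ssum_append, hrevlen]
      rcases Nat.mod_two_eq_zero_or_one n with h | h <;> simp [h, ssum] <;> ring
    rw [haO, haE, hsum1, hsum0,
        drop_set_eq_cons Ao n _ (by rw [hn] at hAo; omega), drop_set_eq_cons Ae n _ (by rw [hn] at hAe; omega)]
    rw [hn, List.range_succ, List.map_append, List.map_append]
    simp only [List.map_cons, List.map_nil, List.append_assoc, List.singleton_append,
      hlast1, hlast0]

-- A's forward loop (reading the suffix arrays) and B's main loop (alternating scalar) produce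
-- the same count, given the canonical states at position k
theorem fwd_eq (nums : List Int) (l : List Int) (k : Nat) (s : Int)
    (hdrop : nums.drop k = l) :
    ((PySem.List.enumerate l (k:Int)).foldl
      (solveStepFwd ((List.range (nums.length + 1)).map (fun j => ssum (decide (j % 2 = 1)) (nums.drop j)))
                    ((List.range (nums.length + 1)).map (fun j => ssum (decide (j % 2 = 0)) (nums.drop j))))
      (s, ssum false (nums.take k), ssum true (nums.take k))).1 =
    (l.foldl (altStep (ssum true nums - ssum false nums))
      (s, ssum true (nums.take k) - ssum false (nums.take k), if k % 2 = 0 then 1 else -1)).1 := by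
  induction l generalizing k s with
  | nil => simp [PySem.List.enumerate_nil]
  | cons x l ih =>
    have hklt : k < nums.length := by
      by_contra hc
      rw [List.drop_eq_nil_of_le (by omega)] at hdrop
      simp at hdrop
    have hget : nums[k]? = some x := by
      have h0 : (nums.drop k)[0]? = some x := by rw [hdrop]; rfl
      simpa [List.getElem?_drop] using h0
    have htk : nums.take (k + 1) = nums.take k ++ [x] := by
      rw [List.take_succ, hget]; rfl
    have hdk : nums.drop (k + 1) = l := by
      have := congrArg List.tail hdrop
      simpa [List.tail_drop] using this
    have hlentk : (nums.take k).length = k := List.length_take_of_le (by omega)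
    rw [PySem.List.enumerate_cons, List.foldl_cons, List.foldl_cons]
    set OSl := (List.range (nums.length + 1)).map (fun j => ssum (decide (j % 2 = 1)) (nums.drop j)) with hOSl
    set ESl := (List.range (nums.length + 1)).map (fun j => ssum (decide (j % 2 = 0)) (nums.drop j)) with hESl
    have hc1 : ((k:Int) + 1) = ((k + 1 : Nat) : Int) := by push_cast; ring
    have hmk : PySem.Int.mod ((k:Nat):Int) 2 = (((k % 2 : Nat)):Int) := by
      exact_mod_cast PySem.Int.mod_natCast k 2
    have hreadE : PySem.List.pyGetD ESl ((k:Int) + 1) 0 = ssum (decide ((k+1) % 2 = 0)) l := by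
      rw [hESl, hc1, PySem.List.pyGetD_natCast, PySem.List.getD_map_range _ _ _ _ (by omega), hdk]
    have hreadO : PySem.List.pyGetD OSl ((k:Int) + 1) 0 = ssum (decide ((k+1) % 2 = 1)) l := by
      rw [hOSl, hc1, PySem.List.pyGetD_natCast, PySem.List.getD_map_range _ _ _ _ (by omega), hdk]
    have hTE : ssum true nums = ssum true (nums.take (k+1)) + ssum (if (k+1) % 2 = 0 then true else false) (nums.drop (k+1)) := by
      conv_lhs => rw [← List.take_append_drop (k+1) nums]
      rw [ssum_append, List.length_take_of_le (by omega)]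
      simp only [Bool.not_true]
    have hTO : ssum false nums = ssum false (nums.take (k+1)) + ssum (if (k+1) % 2 = 0 then false else true) (nums.drop (k+1)) := by
      conv_lhs => rw [← List.take_append_drop (k+1) nums]
      rw [ssum_append, List.length_take_of_le (by omega)]
      simp only [Bool.not_false]
    have htkE : ssum true (nums.take (k+1)) = ssum true (nums.take k) + ssum (if k % 2 = 0 then true else false) [x] := by
      rw [htk, ssum_append, hlentk]
      simp only [Bool.not_true]
    have htkO : ssum false (nums.take (k+1)) = ssum false (nums.take k) + ssum (if k % 2 = 0 then false else true) [x] := by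
      rw [htk, ssum_append, hlentk]
      simp only [Bool.not_false]
    rw [hdk] at hTE hTO
    rcases Nat.mod_two_eq_zero_or_one k with h | h
    · have h1 : (k+1) % 2 = 1 := by omega
      have eE : ssum true (nums.take (k+1)) = ssum true (nums.take k) + x := by
        rw [htkE]; simp [h, ssum]
      have eO : ssum false (nums.take (k+1)) = ssum false (nums.take k) := by
        rw [htkO]; simp [h, ssum]
      have stA : solveStepFwd OSl ESl (s, ssum false (nums.take k), ssum true (nums.take k)) ((k:Int), x)
          = ((if ssum false (nums.take k) + ssum false l = ssum true (nums.take k) + ssum true l then s + 1 else s),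
             ssum false (nums.take k), ssum true (nums.take k) + x) := by
        simp only [solveStepFwd, hreadE, hreadO, hmk, h, h1]
        norm_num
      have stB : altStep (ssum true nums - ssum false nums)
          (s, ssum true (nums.take k) - ssum false (nums.take k), if k % 2 = 0 then 1 else -1) x
          = ((if ssum false (nums.take k) + ssum false l = ssum true (nums.take k) + ssum true l then s + 1 else s),
             ssum true (nums.take k) - ssum false (nums.take k) + x, -1) := by
        have hsign : (if k % 2 = 0 then (1:Int) else -1) = 1 := by simp [h]
        have hTE' : ssum true nums = ssum true (nums.take (k+1)) + ssum false l := by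
          rw [hTE]; simp [h1]
        have hTO' : ssum false nums = ssum false (nums.take (k+1)) + ssum true l := by
          rw [hTO]; simp [h1]
        rw [hsign]
        simp only [altStep, one_mul]
        rw [hTE', hTO', eE, eO]
        refine congrArg₂ Prod.mk ?_ rfl
        exact if_congr (by constructor <;> intro hh <;> omega) rfl rfl
      rw [stA, stB, hc1]
      have e3 : ssum true (nums.take k) - ssum false (nums.take k) + x
          = ssum true (nums.take (k+1)) - ssum false (nums.take (k+1)) := by omega
      have e4 : (-1 : Int) = if (k+1) % 2 = 0 then 1 else -1 := by simp [h1]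
      rw [e3, ← eE, e4, show ssum false (nums.take k) = ssum false (nums.take (k+1)) from eO.symm]
      exact ih (k+1) _ hdk
    · have h1 : (k+1) % 2 = 0 := by omega
      have eE : ssum true (nums.take (k+1)) = ssum true (nums.take k) := by
        rw [htkE]; simp [h, ssum]
      have eO : ssum false (nums.take (k+1)) = ssum false (nums.take k) + x := by
        rw [htkO]; simp [h, ssum]
      have stA : solveStepFwd OSl ESl (s, ssum false (nums.take k), ssum true (nums.take k)) ((k:Int), x)
          = ((if ssum false (nums.take k) + ssum true l = ssum true (nums.take k) + ssum false l then s + 1 else s),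
             ssum false (nums.take k) + x, ssum true (nums.take k)) := by
        simp only [solveStepFwd, hreadE, hreadO, hmk, h, h1]
        norm_num
      have stB : altStep (ssum true nums - ssum false nums)
          (s, ssum true (nums.take k) - ssum false (nums.take k), if k % 2 = 0 then 1 else -1) x
          = ((if ssum false (nums.take k) + ssum true l = ssum true (nums.take k) + ssum false l then s + 1 else s),
             ssum true (nums.take k) - ssum false (nums.take k) + -1 * x, 1) := by
        have hsign : (if k % 2 = 0 then (1:Int) else -1) = -1 := by simp [h]
        have hTE' : ssum true nums = ssum true (nums.take (k+1)) + ssum true l := by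
          rw [hTE]; simp [h1]
        have hTO' : ssum false nums = ssum false (nums.take (k+1)) + ssum false l := by
          rw [hTO]; simp [h1]
        rw [hsign]
        simp only [altStep, neg_neg]
        rw [hTE', hTO', eE, eO]
        refine congrArg₂ Prod.mk ?_ rfl
        exact if_congr (by constructor <;> intro hh <;> omega) rfl rfl
      rw [stA, stB, hc1]
      have e3 : ssum true (nums.take k) - ssum false (nums.take k) + -1 * x
          = ssum true (nums.take (k+1)) - ssum false (nums.take (k+1)) := by omega
      have e4 : (1 : Int) = if (k+1) % 2 = 0 then 1 else -1 := by simp [h1]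
      rw [e3, ← eO, e4, show ssum true (nums.take k) = ssum true (nums.take (k+1)) from eE.symm]
      exact ih (k+1) _ hdk

-- ===== VERDICT (by name: the statement is the Claim_ definition above) =====
theorem solve_spec : Claim_equal_solve := by
  intro nums _
  show solve nums = solve_alt nums
  simp only [solve, solve_alt]
  have hrl : nums.reverse.length = nums.length := by simp
  have hstart : -((nums.length : Int) - 1) = -((nums.reverse.length : Int) - 1) := by rw [hrl]
  rw [hstart, back_spec nums.reverse (List.replicate nums.length (0:Int) ++ [0]) (List.replicate nums.length (0:Int) ++ [0]) 0 0
        (by simp) (by simp)]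
  have hdropRep : (List.replicate nums.length (0:Int) ++ [0]).drop nums.reverse.length = [0] := by
    rw [hrl, List.drop_append_of_le_length (by simp)]
    simp
  have harr : ∀ rnum : Nat, (List.range nums.reverse.length).map (fun j => 0 + ssum (decide (j % 2 = rnum)) (nums.reverse.reverse.drop j)) ++ [0]
      = (List.range (nums.length + 1)).map (fun j => ssum (decide (j % 2 = rnum)) (nums.drop j)) := by
    intro rnum
    rw [List.range_succ, List.map_append, hrl]
    congr 1
    · refine List.map_congr_left ?_
      intro j _
      rw [List.reverse_reverse, zero_add]
    · simp [List.drop_length, ssum]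
  rw [hdropRep]
  simp only [harr 0, harr 1]
  have htot : (nums.foldl altStepT (0, 1)).1 = ssum true nums - ssum false nums := by
    rw [foldT, (asum_pm nums).1]; ring
  rw [htot]
  have := fwd_eq nums nums 0 0 (by simp)
  simp only [Nat.cast_zero, List.take_zero, ssum] at this
  simpa using this
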